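-- pv_equiv track=rewrite | github.com/xian-technology/xian-contracting-hub-web | contracting_hub/services/admin_contract_editor.py | _normalize_contract_tags
-- ===== SOURCE A (Python) =====
-- def _normalize_contract_tags(value: str | None) -> tuple[str, ...]:
--     normalized_tags: list[str] = []
--     seen_tags: set[str] = set()
--     for fragment in str(value or "").replace("\n", ",").split(","):
--         normalized = " ".join(fragment.split()).strip().lower()
--         if not normalized or normalized in seen_tags:
--             continue
--         seen_tags.add(normalized)
--         normalized_tags.append(normalized)
--     return tuple(normalized_tags)
-- ===== SOURCE B (Python) =====
-- def _normalize_contract_tags(value: str | None) -> tuple[str, ...]: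
--     tags: list[str] = []
--     cur: list[str] = []   # characters of the normalized tag being built
--     pending = False       # a separating space is owed before the next character
--     for ch in str(value or "") + ",":
--         if ch == "," or ch == "\n":
--             tag = "".join(cur)
--             if tag and tag not in tags:
--                 tags.append(tag)
--             cur = []
--             pending = False
--         elif ch.isspace():
--             pending = True
--         else:
--             if pending and cur:
--                 cur.append(" ")
--             cur.append(ch.lower())
--             pending = False
--     return tuple(tags)
-- ===== Notes on version B (the rewrite author's own statement) =====
-- stated objective: alternative
-- what changed: Replaces the replace/split/join string-method pipeline plus seen-set loop by a single character-level scan with a pending-space flag that splits fragments, collapses whitespace, lowercases and deduplicates in one pass over the characters.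
import Mathlib
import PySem

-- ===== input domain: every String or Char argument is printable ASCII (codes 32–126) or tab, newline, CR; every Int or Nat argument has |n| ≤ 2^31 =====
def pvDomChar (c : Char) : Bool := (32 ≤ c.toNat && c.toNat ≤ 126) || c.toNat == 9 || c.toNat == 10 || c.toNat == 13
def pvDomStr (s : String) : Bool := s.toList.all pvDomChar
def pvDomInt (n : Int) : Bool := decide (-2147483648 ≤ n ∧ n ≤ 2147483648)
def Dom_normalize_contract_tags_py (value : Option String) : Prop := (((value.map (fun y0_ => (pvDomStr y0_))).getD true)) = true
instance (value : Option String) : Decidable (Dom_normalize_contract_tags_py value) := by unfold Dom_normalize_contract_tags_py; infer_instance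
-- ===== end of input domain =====

-- B replaces A's replace/split/join string-method pipeline plus seen-set loop by a single
-- character-level scan with a pending-space flag (alternative decomposition, same cost).

-- ===== PORT A =====
def normalize_contract_tags_py (value : Option String) : List String :=
  -- str(value or "")
  let s := value.getD ""
  -- for fragment in s.replace("\n", ",").split(","):
  let frags := (PySem.Str.split? (PySem.Str.replace s "\n" ",") ",").getD []
  let step := fun (st : List String × PySem.Set String) (fragment : String) =>
    -- normalized = " ".join(fragment.split()).strip().lower()
    let normalized := PySem.Str.lower (PySem.Str.strip (PySem.Str.join " " (PySem.Str.split₀ fragment)))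
    -- if not normalized or normalized in seen_tags: continue
    if normalized = "" ∨ PySem.Set.contains st.2 normalized = true then st
    else (st.1 ++ [normalized], PySem.Set.add st.2 normalized)
  (frags.foldl step ([], PySem.Set.empty)).1

-- ===== PORT B =====
-- one step of B's character scan; state = (tags, cur, pending)
def tagScanStep (st : List String × List Char × Bool) (ch : Char) : List String × List Char × Bool :=
  if ch = ',' ∨ ch = '\n' then
    -- tag = "".join(cur); if tag and tag not in tags: tags.append(tag)
    let tag := String.ofList st.2.1
    (if tag ≠ "" ∧ st.1.contains tag = false then st.1 ++ [tag] else st.1, [], false)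
  else if PySem.Chars.isspace ch then
    (st.1, st.2.1, true)
  else
    (st.1, st.2.1 ++ (if st.2.2 ∧ st.2.1 ≠ [] then [' '] else []) ++ [PySem.Chars.lowerChar ch], false)

def normalize_contract_tags_py_alt (value : Option String) : List String :=
  -- for ch in str(value or "") + ",":
  (((value.getD "").toList ++ [',']).foldl tagScanStep ([], [], false)).1

-- ===== PRECONDITION & SPEC =====
def Spec_normalize_contract_tags_py (value : Option String) (out : List String) : Prop := out = normalize_contract_tags_py_alt value
instance (value : Option String) (out : List String) : Decidable (Spec_normalize_contract_tags_py value out) := by unfold Spec_normalize_contract_tags_py; infer_instance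

-- ===== CLAIM (what is proved, stated in full; the proofs are below) =====
def Claim_equal_normalize_contract_tags_py : Prop := ∀ (value : Option String), Dom_normalize_contract_tags_py value → Spec_normalize_contract_tags_py value (normalize_contract_tags_py value)

-- ===== LEMMAS AND PROOFS =====

-- proof-side helpers ------------------------------------------------------

-- the character map performed by s.replace("\n", ",")
def nlComma (c : Char) : Char := if c = '\n' then ',' else c

def isSep (c : Char) : Bool := c = ',' || c = '\n'

-- simple recursion for splitting on fragment separators (cur is the reversed current fragment)
def msplit : List Char → List Char → List (List Char)
  | [], cur => [cur.reverse]
  | c :: r, cur => if isSep c then cur.reverse :: msplit r [] else msplit r (c :: cur)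

-- simple recursion equal to Chars.split₀ (cur is the reversed current word)
def pwords : List Char → List Char → List (List Char)
  | [], cur => if cur.isEmpty then [] else [cur.reverse]
  | c :: r, cur =>
      if PySem.Chars.isspace c then
        (if cur.isEmpty then pwords r [] else cur.reverse :: pwords r [])
      else pwords r (c :: cur)

-- the fragment-internal part of tagScanStep (state = (cur, pending))
def fstep (st : List Char × Bool) (c : Char) : List Char × Bool :=
  if PySem.Chars.isspace c then (st.1, true)
  else (st.1 ++ (if st.2 ∧ st.1 ≠ [] then [' '] else []) ++ [PySem.Chars.lowerChar c], false)

-- the normalized form of one fragment, as B computes it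
def normP (f : List Char) : List Char :=
  PySem.Chars.lower (PySem.Chars.join [' '] (pwords f []))

-- the finished fragments (cur char-lists at flush time) B's scan produces from a state
def cfrags : List Char → List Char × Bool → List (List Char)
  | [], st => [st.1]
  | c :: r, st => if isSep c then st.1 :: cfrags r ([], false) else cfrags r (fstep st c)

-- the flush that tagScanStep performs at a separator
def pushT (tags : List String) (cur : List Char) : List String :=
  let tag := String.ofList cur
  if tag ≠ "" ∧ tags.contains tag = false then tags ++ [tag] else tags

-- A-side: the seen-set loop is an ordered dedup (Set.add fold) of the nonempty normalized fragments
theorem fold_eq_filter_foldl_add (norm : String → String) (frags : List String) (acc : List String) :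
    (frags.foldl (fun (st : List String × PySem.Set String) (fragment : String) =>
        if norm fragment = "" ∨ PySem.Set.contains st.2 (norm fragment) = true then st
        else (st.1 ++ [norm fragment], PySem.Set.add st.2 (norm fragment))) (acc, acc)).1
      = ((frags.map norm).filter (fun t => !(t == ""))).foldl PySem.Set.add acc := by
  induction frags generalizing acc with
  | nil => rfl
  | cons f rest ih =>
    simp only [List.foldl_cons, List.map_cons, List.filter_cons]
    by_cases he : norm f = ""
    · have hfilneg : ¬((!(norm f == "")) = true) := by simp [he]
      rw [if_pos (Or.inl he), if_neg hfilneg]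
      exact ih acc
    · have hfil : (!(norm f == "")) = true := by simp [he]
      by_cases hc : PySem.Set.contains acc (norm f) = true
      · have hsk : PySem.Set.add acc (norm f) = acc := by
          simp [PySem.Set.add]; simpa using hc
        rw [if_pos (Or.inr hc), if_pos hfil, List.foldl_cons, hsk]
        exact ih acc
      · have hadd : PySem.Set.add acc (norm f) = acc ++ [norm f] := by
          simp [PySem.Set.add]; simpa using hc
        have hcond : ¬(norm f = "" ∨ PySem.Set.contains acc (norm f) = true) := by
          intro h; cases h with
          | inl h => exact he h
          | inr h => exact hc h
        rw [if_neg hcond, hadd, if_pos hfil, List.foldl_cons, hadd]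
        exact ih (acc ++ [norm f])

-- replace "\n" "," is the character map nlComma
theorem replace_go_nl (cs : List Char) : ∀ (fuel : Nat) (acc : List Char), cs.length ≤ fuel →
    PySem.Chars.replace.go ['\n'] [','] fuel cs acc = acc.reverse ++ cs.map nlComma := by
  induction cs with
  | nil =>
    intro fuel acc _
    cases fuel <;> simp [PySem.Chars.replace.go]
  | cons c t ih =>
    intro fuel acc hf
    cases fuel with
    | zero => simp at hf
    | succ f =>
      by_cases hc : c = '\n'
      · subst hc
        have hp : List.isPrefixOf ['\n'] ('\n' :: t) = true := by simp [List.isPrefixOf]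
        simp only [PySem.Chars.replace.go, hp, if_pos, List.length_cons, List.length_nil,
          List.drop_succ_cons, List.drop_zero, List.reverse_cons, List.reverse_nil, List.nil_append]
        rw [show ([','] ++ acc) = (',' :: acc) from rfl, ih f (',' :: acc) (by simpa using Nat.le_of_succ_le_succ hf)]
        simp [nlComma]
      · have hp : List.isPrefixOf ['\n'] (c :: t) = false := by
          simp [List.isPrefixOf, Ne.symm hc]
        simp only [PySem.Chars.replace.go, hp, Bool.false_eq_true, if_false]
        rw [ih f (c :: acc) (by simpa using Nat.le_of_succ_le_succ hf)]
        simp [nlComma, hc]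

theorem replace_nl (cs : List Char) : PySem.Chars.replace cs ['\n'] [','] = cs.map nlComma := by
  have h := replace_go_nl cs cs.length [] (le_refl _)
  simpa [PySem.Chars.replace] using h

-- splitting the mapped string on ',' is msplit on the original characters
theorem splitOn_msplit_aux (cs : List Char) : ∀ (fuel : Nat) (cur : List Char) (acc : List (List Char)),
    cs.length ≤ fuel →
    PySem.Chars.splitOn.go [','] fuel (cs.map nlComma) cur acc = acc.reverse ++ msplit cs cur := by
  induction cs with
  | nil =>
    intro fuel cur acc _
    cases fuel <;> simp [PySem.Chars.splitOn.go, msplit]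
  | cons c t ih =>
    intro fuel cur acc hf
    cases fuel with
    | zero => simp at hf
    | succ f =>
      by_cases hc : isSep c = true
      · have hn : nlComma c = ',' := by
          rcases (by simpa [isSep] using hc : c = ',' ∨ c = '\n') with h | h <;> simp [nlComma, h]
        have hp : List.isPrefixOf [','] (List.map nlComma (c :: t)) = true := by
          simp [List.isPrefixOf, hn]
        simp only [List.map_cons, hn] at hp ⊢
        simp only [PySem.Chars.splitOn.go, hp, if_pos, List.length_cons, List.length_nil,
          List.drop_succ_cons, List.drop_zero]
        rw [ih f [] (cur.reverse :: acc) (by simpa using Nat.le_of_succ_le_succ hf)]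
        simp [msplit, hc]
      · have hcc : ¬ c = ',' := by intro h; simp [isSep, h] at hc
        have hn : nlComma c = c := by
          have h2 : ¬ c = '\n' := by intro h; simp [isSep, h] at hc
          simp [nlComma, h2]
        have hp : List.isPrefixOf [','] (List.map nlComma (c :: t)) = false := by
          simp [List.isPrefixOf, hn, Ne.symm hcc]
        simp only [List.map_cons, hn] at hp ⊢
        simp only [PySem.Chars.splitOn.go, hp, Bool.false_eq_true, if_false]
        rw [ih f (c :: cur) acc (by simpa using Nat.le_of_succ_le_succ hf)]
        simp [msplit, hc]

theorem splitOn_msplit (cs : List Char) :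
    PySem.Chars.splitOn (cs.map nlComma) [','] = msplit cs [] := by
  have h := splitOn_msplit_aux cs ((cs.map nlComma).length + 1) [] [] (by simp)
  simpa [PySem.Chars.splitOn] using h

-- split₀ is pwords
theorem split₀_go_pwords (cs : List Char) : ∀ (cur : List Char) (acc : List (List Char)),
    PySem.Chars.split₀.go cs cur acc = acc.reverse ++ pwords cs cur := by
  induction cs with
  | nil =>
    intro cur acc
    by_cases h : cur.isEmpty <;> simp [PySem.Chars.split₀.go, pwords, h]
  | cons c t ih =>
    intro cur acc
    by_cases hs : PySem.Chars.isspace c = true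
    · by_cases he : cur.isEmpty
      · simp only [PySem.Chars.split₀.go, hs, he, if_pos]
        rw [ih [] acc]; simp [pwords, hs, he]
      · simp only [PySem.Chars.split₀.go, hs, he, if_true, Bool.false_eq_true, if_false]
        rw [ih [] (cur.reverse :: acc)]; simp [pwords, hs, he]
    · simp only [PySem.Chars.split₀.go, hs, Bool.false_eq_true, if_false]
      rw [ih (c :: cur) acc]; simp [pwords, hs]

theorem split₀_pwords (cs : List Char) : PySem.Chars.split₀ cs = pwords cs [] := by
  have h := split₀_go_pwords cs [] []
  simpa [PySem.Chars.split₀] using h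

-- pwords produces nonempty, space-free words
theorem pwords_words (cs : List Char) : ∀ (cur : List Char),
    (∀ c ∈ cur, PySem.Chars.isspace c = false) →
    ∀ w ∈ pwords cs cur, w ≠ [] ∧ ∀ c ∈ w, PySem.Chars.isspace c = false := by
  induction cs with
  | nil =>
    intro cur hcur w hw
    by_cases h : cur.isEmpty
    · simp [pwords, h] at hw
    · simp only [pwords, h, Bool.false_eq_true, if_false, List.mem_singleton] at hw
      subst hw
      refine ⟨by simpa [List.isEmpty_iff] using h, ?_⟩
      intro c hcm; exact hcur c (by simpa using hcm)
  | cons c t ih =>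
    intro cur hcur w hw
    by_cases hs : PySem.Chars.isspace c = true
    · by_cases he : cur.isEmpty
      · simp only [pwords, hs, he, if_true] at hw
        exact ih [] (by simp) w hw
      · simp only [pwords, hs, he, if_true, Bool.false_eq_true, if_false, List.mem_cons] at hw
        rcases hw with hw | hw
        · subst hw
          refine ⟨by simpa [List.isEmpty_iff] using he, ?_⟩
          intro d hdm; exact hcur d (by simpa using hdm)
        · exact ih [] (by simp) w hw
    · simp only [pwords, hs, Bool.false_eq_true, if_false] at hw
      refine ih (c :: cur) ?_ w hw
      intro d hd
      rcases List.mem_cons.mp hd with h | h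
      · subst h; simpa using hs
      · exact hcur d h

theorem pwords_ne_nil (cs : List Char) : ∀ (cur : List Char), cur ≠ [] → pwords cs cur ≠ [] := by
  induction cs with
  | nil =>
    intro cur h
    simp [pwords, List.isEmpty_iff, h]
  | cons c t ih =>
    intro cur h
    by_cases hs : PySem.Chars.isspace c = true
    · simp [pwords, hs, List.isEmpty_iff, h]
    · simp only [pwords, hs, Bool.false_eq_true, if_false]
      exact ih (c :: cur) (by simp)

theorem join_cons (w : List Char) (ws : List (List Char)) :
    PySem.Chars.join [' '] (w :: ws)
      = w ++ (if ws = [] then [] else ' ' :: PySem.Chars.join [' '] ws) := by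
  cases ws <;> simp [PySem.Chars.join, List.intercalate]

theorem join_rev_head (ws : List (List Char)) (hne : ws ≠ [])
    (h : ∀ w ∈ ws, w ≠ [] ∧ ∀ c ∈ w, PySem.Chars.isspace c = false) :
    ∃ c t, (PySem.Chars.join [' '] ws).reverse = c :: t ∧ PySem.Chars.isspace c = false := by
  induction ws with
  | nil => simp at hne
  | cons w ws ih =>
    cases ws with
    | nil =>
      obtain ⟨hw, hall⟩ := h w (by simp)
      cases hr : w.reverse with
      | nil => simp [List.reverse_eq_nil_iff] at hr; exact absurd hr hw
      | cons c t =>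
        refine ⟨c, t, by simpa [join_cons] using hr, ?_⟩
        exact hall c (by rw [← List.mem_reverse, hr]; simp)
    | cons v vs =>
      obtain ⟨c, t, hct, hcs⟩ := ih (by simp) (fun u hu => h u (by simp [hu]))
      refine ⟨c, t ++ [' '] ++ w.reverse, ?_, hcs⟩
      rw [join_cons]
      simp only [if_neg (by simp : ¬ (v :: vs) = [])]
      simp [hct]

-- strip is the identity on a join of nonempty space-free words
theorem strip_join (ws : List (List Char))
    (h : ∀ w ∈ ws, w ≠ [] ∧ ∀ c ∈ w, PySem.Chars.isspace c = false) :
    PySem.Chars.strip (PySem.Chars.join [' '] ws) = PySem.Chars.join [' '] ws := by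
  cases ws with
  | nil => simp [PySem.Chars.strip, PySem.Chars.lstrip, PySem.Chars.rstrip, PySem.Chars.join, List.intercalate]
  | cons w ws =>
    obtain ⟨hw, hall⟩ := h w (by simp)
    have hl : PySem.Chars.lstrip (PySem.Chars.join [' '] (w :: ws)) = PySem.Chars.join [' '] (w :: ws) := by
      cases w with
      | nil => exact absurd rfl hw
      | cons a w' =>
        have ha : PySem.Chars.isspace a = false := hall a (by simp)
        rw [join_cons]
        simp [PySem.Chars.lstrip, ha]
    obtain ⟨c, t, hct, hcs⟩ := join_rev_head (w :: ws) (by simp) h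
    have hr : PySem.Chars.rstrip (PySem.Chars.join [' '] (w :: ws)) = PySem.Chars.join [' '] (w :: ws) := by
      unfold PySem.Chars.rstrip
      rw [hct]
      simp only [List.dropWhile_cons, hcs, Bool.false_eq_true, if_false]
      rw [← hct]; simp
    unfold PySem.Chars.strip
    rw [hl, hr]

-- A's per-fragment normalization equals B's normP
theorem normC_eq_normP (f : List Char) :
    PySem.Chars.lower (PySem.Chars.strip (PySem.Chars.join [' '] (PySem.Chars.split₀ f))) = normP f := by
  rw [split₀_pwords, strip_join (pwords f []) (pwords_words f [] (by simp)), normP]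

theorem lowerChar_space : PySem.Chars.lowerChar ' ' = ' ' := by decide

theorem lower_ne_nil (a : List Char) (h : a ≠ []) : PySem.Chars.lower a ≠ [] := by
  simpa [PySem.Chars.lower] using h

-- B's in-fragment scan computes normP (generalized over entry state)
theorem fstep_foldl (f : List Char) :
    (∀ s : List Char, (f.foldl fstep (s, true)).1
        = s ++ (if s ≠ [] ∧ pwords f [] ≠ [] then [' '] else []) ++ PySem.Chars.lower (PySem.Chars.join [' '] (pwords f [])))
    ∧ (∀ (s cur : List Char), cur ≠ [] → (f.foldl fstep (s ++ PySem.Chars.lower cur.reverse, false)).1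
        = s ++ PySem.Chars.lower (PySem.Chars.join [' '] (pwords f cur))) := by
  induction f with
  | nil =>
    constructor
    · intro s
      simp [pwords, PySem.Chars.join, List.intercalate, PySem.Chars.lower]
    · intro s cur hcur
      simp [pwords, List.isEmpty_iff, hcur, PySem.Chars.join, List.intercalate]
  | cons c r ih =>
    constructor
    · intro s
      by_cases hs : PySem.Chars.isspace c = true
      · have hst : fstep (s, true) c = (s, true) := by simp [fstep, hs]
        rw [List.foldl_cons, hst]
        have hp : pwords (c :: r) [] = pwords r [] := by simp [pwords, hs]
        rw [hp]; exact ih.1 s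
      · have hst : fstep (s, true) c
            = ((s ++ (if s ≠ [] then [' '] else [])) ++ PySem.Chars.lower ([c].reverse), false) := by
          simp [fstep, hs, PySem.Chars.lower]
        rw [List.foldl_cons, hst, ih.2 (s ++ (if s ≠ [] then [' '] else [])) [c] (by simp)]
        have hp : pwords (c :: r) [] = pwords r [c] := by simp [pwords, hs]
        have hnn : pwords r [c] ≠ [] := pwords_ne_nil r [c] (by simp)
        rw [hp]
        by_cases hsn : s = [] <;> simp [hsn, hnn, List.append_assoc]
    · intro s cur hcur
      by_cases hs : PySem.Chars.isspace c = true
      · have hst : fstep (s ++ PySem.Chars.lower cur.reverse, false) c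
            = (s ++ PySem.Chars.lower cur.reverse, true) := by simp [fstep, hs]
        rw [List.foldl_cons, hst, ih.1 (s ++ PySem.Chars.lower cur.reverse)]
        have hp : pwords (c :: r) cur = cur.reverse :: pwords r [] := by
          simp [pwords, hs, List.isEmpty_iff, hcur]
        rw [hp, join_cons]
        by_cases hws : pwords r [] = []
        · simp [hws, PySem.Chars.join, List.intercalate, PySem.Chars.lower]
        · have hX : s ++ PySem.Chars.lower cur.reverse ≠ [] := by
            have := lower_ne_nil cur.reverse (by simpa using hcur)
            simp only [ne_eq, List.append_eq_nil_iff]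
            tauto
          rw [if_pos ⟨hX, hws⟩, if_neg hws]
          simp [PySem.Chars.lower, lowerChar_space, List.append_assoc]
      · have hst : fstep (s ++ PySem.Chars.lower cur.reverse, false) c
            = (s ++ PySem.Chars.lower ((c :: cur).reverse), false) := by
          simp [fstep, hs, PySem.Chars.lower]
        rw [List.foldl_cons, hst, ih.2 s (c :: cur) (by simp)]
        have hp : pwords (c :: r) cur = pwords r (c :: cur) := by simp [pwords, hs]
        rw [hp]

theorem fstep_foldl_start (f : List Char) :
    (f.foldl fstep ([], false)).1 = normP f := by
  cases f with
  | nil => simp [normP, pwords, PySem.Chars.join, List.intercalate, PySem.Chars.lower]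
  | cons c r =>
    by_cases hs : PySem.Chars.isspace c = true
    · have hst : fstep (([] : List Char), false) c = ([], true) := by simp [fstep, hs]
      rw [List.foldl_cons, hst, (fstep_foldl r).1 []]
      simp [normP, pwords, hs]
    · have hst : fstep (([] : List Char), false) c
          = (([] : List Char) ++ PySem.Chars.lower ([c].reverse), false) := by
        simp [fstep, hs, PySem.Chars.lower]
      rw [List.foldl_cons, hst, (fstep_foldl r).2 [] [c] (by simp)]
      simp [normP, pwords, hs]

-- tagScanStep on a non-separator character is fstep on the (cur, pending) part
theorem tagScanStep_nonsep (tags : List String) (st : List Char × Bool) (c : Char)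
    (h : isSep c = false) : tagScanStep (tags, st) c = (tags, fstep st c) := by
  have h' : ¬ (c = ',' ∨ c = '\n') := by
    intro hor
    rcases hor with h1 | h1 <;> simp [isSep, h1] at h
  by_cases hs : PySem.Chars.isspace c = true <;>
    simp [tagScanStep, fstep, h', hs]

-- B's full scan is a pushT fold over the flushed fragments
theorem scan_foldl (cs : List Char) : ∀ (tags : List String) (st : List Char × Bool),
    (((cs ++ [',']).foldl tagScanStep (tags, st)).1) = List.foldl pushT tags (cfrags cs st) := by
  induction cs with
  | nil =>
    intro tags st
    simp [tagScanStep, pushT, cfrags]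
  | cons c r ih =>
    intro tags st
    by_cases hc : isSep c = true
    · have hsep : c = ',' ∨ c = '\n' := by simpa [isSep] using hc
      have hst : tagScanStep (tags, st) c = (pushT tags st.1, [], false) := by
        simp [tagScanStep, hsep, pushT]
      rw [List.cons_append, List.foldl_cons, hst]
      have := ih (pushT tags st.1) ([], false)
      rw [show ((pushT tags st.1, ([] : List Char), false) : List String × List Char × Bool)
            = (pushT tags st.1, (([] : List Char), false)) from rfl, this]
      simp [cfrags, hc]
    · have hcf : isSep c = false := by simpa using hc
      rw [List.cons_append, List.foldl_cons, tagScanStep_nonsep tags st c hcf, ih tags (fstep st c)]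
      simp [cfrags, hcf]

theorem msplit_ne_nil (cs : List Char) : ∀ (cur : List Char), msplit cs cur ≠ [] := by
  induction cs with
  | nil => intro cur; simp [msplit]
  | cons c r ih =>
    intro cur
    by_cases h : isSep c = true <;> simp [msplit, h, ih]

-- msplit with a seeded current fragment
theorem msplit_cur (cs : List Char) : ∀ (cur : List Char),
    msplit cs cur = (cur.reverse ++ (msplit cs []).head!) :: (msplit cs []).tail := by
  induction cs with
  | nil => intro cur; simp [msplit]
  | cons c r ih =>
    intro cur
    by_cases h : isSep c = true
    · simp [msplit, h]
    · simp only [msplit, h, Bool.false_eq_true, if_false]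
      rw [ih (c :: cur), ih [c]]
      simp

-- the flushed fragments are the normP images of the msplit fragments
theorem cfrags_msplit (cs : List Char) : ∀ (st : List Char × Bool),
    cfrags cs st = ((msplit cs []).head!.foldl fstep st).1 :: ((msplit cs []).tail.map normP) := by
  induction cs with
  | nil => intro st; simp [cfrags, msplit]
  | cons c r ih =>
    intro st
    cases hm : msplit r [] with
    | nil => exact absurd hm (msplit_ne_nil r [])
    | cons h0 t0 =>
      by_cases h : isSep c = true
      · simp only [cfrags, h, if_pos]
        have h2 := ih ([], false)
        rw [hm] at h2
        simp only [List.head!_cons, List.tail_cons] at h2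
        rw [h2, fstep_foldl_start h0]
        simp [msplit, h, hm]
      · simp only [cfrags, h, Bool.false_eq_true, if_false]
        rw [ih (fstep st c), hm]
        have hms : msplit (c :: r) [] = (c :: h0) :: t0 := by
          simp only [msplit, h, Bool.false_eq_true, if_false]
          rw [msplit_cur r [c], hm]
          simp
        rw [hms]
        simp

theorem cfrags_start (cs : List Char) : cfrags cs ([], false) = (msplit cs []).map normP := by
  cases hm : msplit cs [] with
  | nil => exact absurd hm (msplit_ne_nil cs [])
  | cons h0 t0 =>
    have h := cfrags_msplit cs ([], false)
    rw [hm] at h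
    simp only [List.head!_cons, List.tail_cons] at h
    rw [h, fstep_foldl_start h0]
    simp

-- pushT fold = Set.add fold of the nonempty strings
theorem pushT_foldl (l : List (List Char)) : ∀ (acc : List String),
    List.foldl pushT acc l
      = ((l.map String.ofList).filter (fun t => !(t == ""))).foldl PySem.Set.add acc := by
  induction l with
  | nil => intro acc; rfl
  | cons x r ih =>
    intro acc
    simp only [List.foldl_cons, List.map_cons, List.filter_cons]
    by_cases he : String.ofList x = ""
    · have : pushT acc x = acc := by simp [pushT, he]
      rw [this]
      simp only [he]
      rw [if_neg (by simp)]
      exact ih acc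
    · rw [if_pos (by simpa using he)]
      by_cases hc : acc.contains (String.ofList x) = true
      · have hm : String.ofList x ∈ acc := by simpa using hc
        have h1 : pushT acc x = acc := by simp [pushT, hm]
        have h2 : PySem.Set.add acc (String.ofList x) = acc := by
          simp [PySem.Set.add]; simpa using hc
        rw [h1, List.foldl_cons, h2]
        exact ih acc
      · have h1 : pushT acc x = acc ++ [String.ofList x] := by
          simp only [pushT]
          rw [if_pos ⟨he, by simpa using hc⟩]
        have h2 : PySem.Set.add acc (String.ofList x) = acc ++ [String.ofList x] := by
          simp [PySem.Set.add]; simpa using hc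
        rw [h1, List.foldl_cons, h2]
        exact ih (acc ++ [String.ofList x])

-- per-fragment normalization, string level
theorem normStr_ofList (f : List Char) :
    PySem.Str.lower (PySem.Str.strip (PySem.Str.join " " (PySem.Str.split₀ (String.ofList f))))
      = String.ofList (normP f) := by
  have ht : (PySem.Str.lower (PySem.Str.strip (PySem.Str.join " " (PySem.Str.split₀ (String.ofList f))))).toList
      = normP f := by
    rw [PySem.Str.toList_lower, PySem.Str.toList_strip, PySem.Str.toList_join,
      PySem.Str.split₀_map_toList]
    simp only [String.toList_ofList]
    exact normC_eq_normP f
  rw [← ht, String.ofList_toList]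

-- the fragment list A iterates over, as msplit
theorem frags_eq (s : String) :
    (PySem.Str.split? (PySem.Str.replace s "\n" ",") ",").getD []
      = (msplit s.toList []).map String.ofList := by
  have hrep : (PySem.Str.replace s "\n" ",").toList = s.toList.map nlComma := by
    rw [PySem.Str.toList_replace]
    rw [show ("\n" : String).toList = ['\n'] from rfl, show ("," : String).toList = [','] from rfl]
    exact replace_nl s.toList
  have hbr := PySem.Str.split?_map (PySem.Str.replace s "\n" ",") ","
  rw [hrep, show ("," : String).toList = [','] from rfl] at hbr
  have hch : PySem.Chars.split? (s.toList.map nlComma) [','] = some (msplit s.toList []) := by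
    have h0 : PySem.Chars.split? (s.toList.map nlComma) [',']
        = some (PySem.Chars.splitOn (s.toList.map nlComma) [',']) := by
      simp [PySem.Chars.split?]
    rw [h0, splitOn_msplit]
  rw [hch] at hbr
  cases hsp : PySem.Str.split? (PySem.Str.replace s "\n" ",") "," with
  | none => rw [hsp] at hbr; simp at hbr
  | some F =>
    rw [hsp] at hbr
    simp only [Option.map_some, Option.some_inj] at hbr
    have hF : F.map (fun t => String.ofList t.toList) = (msplit s.toList []).map String.ofList := by
      have hmm : F.map (fun t => String.ofList t.toList)
          = (F.map String.toList).map String.ofList := by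
        rw [List.map_map]; rfl
      rw [hmm, hbr]
    simpa [String.ofList_toList] using hF

-- ===== VERDICT (by name: the statement is the Claim_ definition above) =====
theorem normalize_contract_tags_py_spec : Claim_equal_normalize_contract_tags_py := by
  intro value _
  unfold Spec_normalize_contract_tags_py normalize_contract_tags_py normalize_contract_tags_py_alt
  simp only []
  have hA := fold_eq_filter_foldl_add
    (fun fragment => PySem.Str.lower (PySem.Str.strip (PySem.Str.join " " (PySem.Str.split₀ fragment))))
    ((PySem.Str.split? (PySem.Str.replace (value.getD "") "\n" ",") ",").getD []) []
  rw [show (PySem.Set.empty : PySem.Set String) = ([] : List String) from rfl, hA]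
  rw [frags_eq (value.getD "")]
  have hmap : (((msplit (value.getD "").toList []).map String.ofList).map
        (fun fragment => PySem.Str.lower (PySem.Str.strip (PySem.Str.join " " (PySem.Str.split₀ fragment)))))
      = ((msplit (value.getD "").toList []).map normP).map String.ofList := by
    rw [List.map_map, List.map_map]
    apply List.map_congr_left
    intro f _
    exact normStr_ofList f
  rw [hmap]
  have hpair : (([], [], false) : List String × List Char × Bool)
      = (([] : List String), (([] : List Char), false)) := rfl
  rw [hpair, scan_foldl (value.getD "").toList [] ([], false), cfrags_start, pushT_foldl]
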